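-- pv_equiv track=rewrite | github.com/afbarnard/barnapy | barnapy/test/combinatorics_test.py | _counts_extrema
-- ===== SOURCE A (Python) =====
-- def _counts_extrema(counts):
--     extrema = {}
--     for (subset, count) in counts.items():
--         subset_size = len(subset)
--         if subset_size in extrema:
--             (min_count, max_count) = extrema[subset_size]
--             if count < min_count:
--                 extrema[subset_size] = (count, max_count)
--             elif count > max_count:
--                 extrema[subset_size] = (min_count, count)
--         else:
--             extrema[subset_size] = (count, count)
--     return extrema
-- ===== SOURCE B (Python) =====
-- def _counts_extrema(counts):
--     # Phase 1: group all counts by subset size.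
--     groups = {}
--     for (subset, count) in counts.items():
--         groups.setdefault(len(subset), []).append(count)
--     # Phase 2: reduce each group to its extrema.
--     return {size: (min(vals), max(vals)) for size, vals in groups.items()}
-- ===== Notes on version B (the rewrite author's own statement) =====
-- stated objective: simpler
-- what changed: B replaces A's fused single-pass running-extrema update with two phases: first group every count into a per-size list (setdefault/append), then build the result by taking min/max of each completed group.
import Mathlib
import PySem

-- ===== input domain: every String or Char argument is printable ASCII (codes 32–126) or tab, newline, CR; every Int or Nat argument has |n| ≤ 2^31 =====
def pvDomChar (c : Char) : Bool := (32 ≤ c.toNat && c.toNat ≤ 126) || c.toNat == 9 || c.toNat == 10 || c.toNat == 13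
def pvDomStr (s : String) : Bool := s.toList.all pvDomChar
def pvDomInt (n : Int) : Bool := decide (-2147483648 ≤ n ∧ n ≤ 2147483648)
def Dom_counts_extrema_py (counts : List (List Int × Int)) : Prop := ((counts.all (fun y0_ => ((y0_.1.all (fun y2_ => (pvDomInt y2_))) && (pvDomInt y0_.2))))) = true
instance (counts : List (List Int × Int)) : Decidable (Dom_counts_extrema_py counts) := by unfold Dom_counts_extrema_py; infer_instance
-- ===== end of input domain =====

-- B groups counts into per-size lists first and reduces each group to (min, max) afterwards,
-- instead of A's fused single-pass running-extrema update; objective: simpler two-phase decomposition.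


-- ===== PORT A =====
-- one loop iteration of A: update the running (min, max) for this subset's size
def pvStepA (d : PySem.Dict Int (Int × Int)) (p : List Int × Int) : PySem.Dict Int (Int × Int) :=
  let subset_size : Int := p.1.length
  match d.get? subset_size with
  | some (min_count, max_count) =>
      if p.2 < min_count then d.insert subset_size (p.2, max_count)
      else if p.2 > max_count then d.insert subset_size (min_count, p.2)
      else d
  | none => d.insert subset_size (p.2, p.2)

def counts_extrema_py (counts : List (List Int × Int)) : List (Int × Int × Int) :=
  (counts.foldl pvStepA PySem.Dict.empty).items

-- ===== PORT B =====
-- one grouping iteration of B: groups.setdefault(len(subset), []).append(count)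
def pvStepB (g : PySem.Dict Int (List Int)) (p : List Int × Int) : PySem.Dict Int (List Int) :=
  g.modify ((p.1.length : Int)) [] (· ++ [p.2])

-- Python's min(vals) / max(vals) on a nonempty list (left fold from the head)
def pvMinList : List Int → Int
  | [] => 0
  | v :: r => r.foldl min v

def pvMaxList : List Int → Int
  | [] => 0
  | v :: r => r.foldl max v

def counts_extrema_py_alt (counts : List (List Int × Int)) : List (Int × Int × Int) :=
  let groups := counts.foldl pvStepB PySem.Dict.empty
  groups.items.map (fun p => (p.1, pvMinList p.2, pvMaxList p.2))

-- ===== PRECONDITION & SPEC =====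
def Spec_counts_extrema_py (counts : List (List Int × Int)) (out : List (Int × Int × Int)) : Prop := out = counts_extrema_py_alt counts
instance (counts : List (List Int × Int)) (out : List (Int × Int × Int)) : Decidable (Spec_counts_extrema_py counts out) := by unfold Spec_counts_extrema_py; infer_instance

-- ===== CLAIM (what is proved, stated in full; the proofs are below) =====
def Claim_equal_counts_extrema_py : Prop := ∀ (counts : List (List Int × Int)), Dom_counts_extrema_py counts → Spec_counts_extrema_py counts (counts_extrema_py counts)

-- ===== LEMMAS AND PROOFS =====
-- reduce a group to its extrema
def pvRed (vs : List Int) : Int × Int := (pvMinList vs, pvMaxList vs)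

-- A's dict is B's groups dict with each group reduced
def pvMapD (g : PySem.Dict Int (List Int)) : PySem.Dict Int (Int × Int) :=
  PySem.Dict.mk (g.items.map (fun p => (p.1, pvRed p.2)))

theorem pvFoldlMin_le (r : List Int) (v : Int) : r.foldl min v ≤ v := by
  induction r generalizing v with
  | nil => simp
  | cons a t ih => simpa using le_trans (ih (min v a)) (min_le_left v a)

theorem pvLe_foldlMax (r : List Int) (v : Int) : v ≤ r.foldl max v := by
  induction r generalizing v with
  | nil => simp
  | cons a t ih => simpa using le_trans (le_max_left v a) (ih (max v a))

theorem pvMin_le_max (vs : List Int) (h : vs ≠ []) : pvMinList vs ≤ pvMaxList vs := by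
  match vs with
  | v :: r => exact le_trans (pvFoldlMin_le r v) (pvLe_foldlMax r v)

theorem pvMin_append (vs : List Int) (c : Int) (h : vs ≠ []) :
    pvMinList (vs ++ [c]) = min (pvMinList vs) c := by
  match vs with
  | v :: r => simp [pvMinList, List.foldl_append]

theorem pvMax_append (vs : List Int) (c : Int) (h : vs ≠ []) :
    pvMaxList (vs ++ [c]) = max (pvMaxList vs) c := by
  match vs with
  | v :: r => simp [pvMaxList, List.foldl_append]

theorem pvMapD_get? (g : PySem.Dict Int (List Int)) (k : Int) :
    (pvMapD g).get? k = (g.get? k).map pvRed := by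
  obtain ⟨items⟩ := g
  induction items with
  | nil => rfl
  | cons p rest ih =>
      obtain ⟨a, b⟩ := p
      show (PySem.Dict.mk ((a, pvRed b) :: rest.map (fun p => (p.1, pvRed p.2)))).get? k = _
      rw [PySem.Dict.get?_mk_cons, PySem.Dict.get?_mk_cons]
      by_cases h : a == k
      · simp [h]
      · simp only [h, if_neg, Bool.false_eq_true, not_false_eq_true]
        exact ih

theorem pvMapD_keys (g : PySem.Dict Int (List Int)) : (pvMapD g).keys = g.keys := by
  obtain ⟨items⟩ := g
  simp [pvMapD, PySem.Dict.keys]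

theorem pvMapD_contains (g : PySem.Dict Int (List Int)) (k : Int) :
    (pvMapD g).contains k = g.contains k := by
  rw [PySem.Dict.contains_eq_isSome_get?, PySem.Dict.contains_eq_isSome_get?, pvMapD_get?]
  cases g.get? k <;> rfl

theorem pvMapD_insert (g : PySem.Dict Int (List Int)) (k : Int) (vs : List Int) :
    pvMapD (g.insert k vs) = (pvMapD g).insert k (pvRed vs) := by
  apply PySem.Dict.ext
  show ((g.insert k vs).items.map (fun p => (p.1, pvRed p.2))) = ((pvMapD g).insert k (pvRed vs)).items
  rw [PySem.Dict.items_insert g, PySem.Dict.items_insert (pvMapD g), pvMapD_contains]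
  by_cases h : g.contains k
  · simp only [h, if_true, pvMapD, List.map_map]
    congr 1; funext p
    by_cases hp : p.1 = k <;> simp [hp]
  · simp [h, pvMapD]

-- inserting the value already present at k leaves the dict unchanged
theorem pvInsert_same (d : PySem.Dict Int (Int × Int)) (k : Int) (v : Int × Int)
    (hnd : d.keys.Nodup) (h : d.get? k = some v) : d.insert k v = d := by
  apply PySem.Dict.ext
  rw [PySem.Dict.items_insert_of_contains]
  · have hmem := PySem.Dict.mem_items_of_get?_eq_some d h
    conv_rhs => rw [← List.map_id d.items]
    apply List.map_congr_left
    intro p hp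
    by_cases hk : p.1 == k
    · have h1 : p.1 = k := by simpa using hk
      have : d.get? p.1 = some p.2 := PySem.Dict.get?_of_mem_items d hp hnd
      rw [h1, h] at this
      have hv : v = p.2 := Option.some_inj.mp this
      simp [← h1, hv]
    · simp [hk]
  · rw [PySem.Dict.contains_eq_isSome_get?, h]; rfl

theorem pvStep_comm (g : PySem.Dict Int (List Int)) (p : List Int × Int)
    (hnd : g.keys.Nodup) (hne : ∀ q ∈ g.items, q.2 ≠ []) :
    pvStepA (pvMapD g) p = pvMapD (pvStepB g p) := by
  have hmod : pvStepB g p = g.insert ((p.1.length : Int)) ((g.getD ((p.1.length : Int)) []) ++ [p.2]) := rfl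
  rw [hmod, pvMapD_insert]
  cases hg : g.get? ((p.1.length : Int)) with
  | none =>
      have : g.getD ((p.1.length : Int)) [] = [] := PySem.Dict.getD_of_get?_eq_none g [] hg
      simp only [pvStepA, pvMapD_get?, hg, Option.map_none, this, List.nil_append]
      rfl
  | some vs =>
      have hvs : vs ≠ [] := by
        exact hne (((p.1.length : Int)), vs) (PySem.Dict.mem_items_of_get?_eq_some g hg)
      have hgd : g.getD ((p.1.length : Int)) [] = vs := PySem.Dict.getD_of_get?_eq_some g [] hg
      have hred : pvRed (vs ++ [p.2]) = (min (pvMinList vs) p.2, max (pvMaxList vs) p.2) := by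
        simp [pvRed, pvMin_append vs p.2 hvs, pvMax_append vs p.2 hvs]
      have hle := pvMin_le_max vs hvs
      simp only [pvStepA, pvMapD_get?, hg, Option.map_some, hgd, pvRed]
      by_cases h1 : p.2 < pvMinList vs
      · simp [h1, pvMin_append vs p.2 hvs, pvMax_append vs p.2 hvs,
          min_eq_right h1.le, max_eq_left (le_trans h1.le hle)]
      · by_cases h2 : p.2 > pvMaxList vs
        · simp [h1, h2, pvMin_append vs p.2 hvs, pvMax_append vs p.2 hvs,
            min_eq_left (not_lt.mp h1), max_eq_right h2.le]
        · simp only [h1, if_false, h2, if_false]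
          rw [pvMin_append vs p.2 hvs, pvMax_append vs p.2 hvs,
            min_eq_left (not_lt.mp h1), max_eq_left (not_lt.mp h2)]
          exact (pvInsert_same (pvMapD g) ((p.1.length : Int)) (pvMinList vs, pvMaxList vs)
            (by rw [pvMapD_keys]; exact hnd)
            (by rw [pvMapD_get?, hg]; rfl)).symm

theorem pvStepB_nodup (g : PySem.Dict Int (List Int)) (p : List Int × Int)
    (hnd : g.keys.Nodup) : (pvStepB g p).keys.Nodup := by
  unfold pvStepB PySem.Dict.modify
  exact PySem.Dict.nodup_keys_insert _ _ _ hnd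

theorem pvStepB_ne (g : PySem.Dict Int (List Int)) (p : List Int × Int)
    (hne : ∀ q ∈ g.items, q.2 ≠ []) : ∀ q ∈ (pvStepB g p).items, q.2 ≠ [] := by
  intro q hq
  rw [show pvStepB g p = g.insert ((p.1.length : Int)) ((g.getD ((p.1.length : Int)) []) ++ [p.2]) from rfl] at hq
  have : q = ((p.1.length : Int), (g.getD (p.1.length : Int) []) ++ [p.2]) ∨
      (q ∈ g.items ∧ q.1 ≠ (p.1.length : Int)) := by
    exact (PySem.Dict.mem_items_insert g _ _ q).mp hq
  rcases this with h | ⟨h, _⟩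
  · subst h; simp
  · exact hne q h

theorem pvFold_eq (l : List (List Int × Int)) (g : PySem.Dict Int (List Int))
    (hnd : g.keys.Nodup) (hne : ∀ q ∈ g.items, q.2 ≠ []) :
    l.foldl pvStepA (pvMapD g) = pvMapD (l.foldl pvStepB g) := by
  induction l generalizing g with
  | nil => rfl
  | cons p t ih =>
      simp only [List.foldl_cons]
      rw [pvStep_comm g p hnd hne]
      exact ih (pvStepB g p) (pvStepB_nodup g p hnd) (pvStepB_ne g p hne)

-- ===== VERDICT (by name: the statement is the Claim_ definition above) =====
theorem counts_extrema_py_spec : Claim_equal_counts_extrema_py := by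
  intro counts _
  unfold Spec_counts_extrema_py counts_extrema_py counts_extrema_py_alt
  have h0 : pvMapD PySem.Dict.empty = PySem.Dict.empty := rfl
  rw [← h0, pvFold_eq counts PySem.Dict.empty (by simp [PySem.Dict.empty, PySem.Dict.keys]) (by simp [PySem.Dict.empty])]
  obtain ⟨items⟩ := counts.foldl pvStepB PySem.Dict.empty
  simp [pvMapD, pvRed]
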